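-- pv_equiv track=rewrite | github.com/DonalChilde/eve-static-data | scripts/jsonl_type_inspector.py | _union_type
-- ===== SOURCE A (Python) =====
-- def _union_type(type_parts: list[str]) -> str:
--     """Return a deterministic union expression from type fragments.
--
--     Args:
--         type_parts: Candidate type strings.
--
--     Returns:
--         Single type string or union type expression.
--     """
--     unique: list[str] = []
--     for part in type_parts:
--         if part not in unique:
--             unique.append(part)
--     if not unique:
--         return "Any"
--     if len(unique) == 1:
--         return unique[0]
--     return " | ".join(sorted(unique))
-- ===== SOURCE B (Python) =====
-- def _union_type(type_parts: list[str]) -> str: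
--     """Return a deterministic union expression from type fragments.
--
--     Sort first, then drop adjacent duplicates by zipping the sorted list
--     with its shift and keeping each element that differs from its
--     successor (plus the last element), instead of a membership test
--     against a growing accumulator.
--     """
--     ordered = sorted(type_parts)
--     kept = [x for x, nxt in zip(ordered, ordered[1:]) if x != nxt]
--     if ordered:
--         kept.append(ordered[-1])
--     match kept:
--         case []:
--             return "Any"
--         case [only]:
--             return only
--         case unique:
--             return " | ".join(unique)
-- ===== Notes on version B (the rewrite author's own statement) =====
-- stated objective: faster
-- what changed: B sorts the list once and removes adjacent duplicates in one comprehension over the list zipped with its shift (keep an element iff it differs from its successor, plus the last), replacing A's per-element membership scan of a growing list and A's final re-sort.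
import Mathlib
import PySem

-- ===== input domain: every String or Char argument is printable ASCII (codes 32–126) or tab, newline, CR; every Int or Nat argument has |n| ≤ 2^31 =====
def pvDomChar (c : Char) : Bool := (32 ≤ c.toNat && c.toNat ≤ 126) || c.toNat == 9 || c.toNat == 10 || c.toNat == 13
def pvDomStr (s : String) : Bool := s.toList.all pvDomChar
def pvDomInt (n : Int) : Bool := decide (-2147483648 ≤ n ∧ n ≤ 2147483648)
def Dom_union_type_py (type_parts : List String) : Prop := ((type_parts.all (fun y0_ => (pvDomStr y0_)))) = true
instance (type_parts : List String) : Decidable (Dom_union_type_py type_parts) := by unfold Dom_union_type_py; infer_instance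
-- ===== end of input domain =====

-- B sorts once and removes adjacent duplicates by structural recursion, instead of A's membership scan of a growing list plus a final sort; same return value proved.


-- ===== PORT A =====
-- A's loop body: append part when it is not yet in the accumulator
def unionStepA (acc : List String) (part : String) : List String :=
  if part ∈ acc then acc else acc ++ [part]

def union_type_py (type_parts : List String) : String :=
  let unique := type_parts.foldl unionStepA []
  if unique = [] then "Any"
  else if unique.length = 1 then PySem.List.pyGetD unique 0 ""
  else PySem.Str.join " | " (PySem.List.sorted unique (fun x => x) false)

-- ===== PORT B =====
-- B's comprehension: zip the sorted list with its shift, keep x iff it differs from its successor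
def keptOf (ordered : List String) : List String :=
  ((ordered.zip (ordered.drop 1)).filter (fun p => p.1 != p.2)).map Prod.fst

def union_type_py_alt (type_parts : List String) : String :=
  let ordered := PySem.List.sorted type_parts (fun x => x) false
  let unique := match ordered.getLast? with
    | none => keptOf ordered
    | some z => keptOf ordered ++ [z]     -- 'if ordered: kept.append(ordered[-1])'
  match unique with
  | [] => "Any"
  | [only] => only
  | unique => PySem.Str.join " | " unique

-- ===== PRECONDITION & SPEC =====
def Spec_union_type_py (type_parts : List String) (out : String) : Prop := out = union_type_py_alt type_parts
instance (type_parts : List String) (out : String) : Decidable (Spec_union_type_py type_parts out) := by unfold Spec_union_type_py; infer_instance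

-- ===== CLAIM (what is proved, stated in full; the proofs are below) =====
def Claim_equal_union_type_py : Prop := ∀ (type_parts : List String), Dom_union_type_py type_parts → Spec_union_type_py type_parts (union_type_py type_parts)

-- ===== LEMMAS AND PROOFS =====

-- proof-side helper: adjacent dedup as a structural recursion
def dedupAdj : List String → List String
  | [] => []
  | [x] => [x]
  | x :: y :: t => if x = y then dedupAdj (y :: t) else x :: dedupAdj (y :: t)

-- B's zip-comprehension plus appended last element IS adjacent dedup
theorem keptOf_last_eq_dedupAdj (xs : List String) :
    (match xs.getLast? with
      | none => keptOf xs
      | some z => keptOf xs ++ [z]) = dedupAdj xs := by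
  induction xs with
  | nil => simp [keptOf, dedupAdj]
  | cons a t ih =>
    cases t with
    | nil => simp [keptOf, dedupAdj]
    | cons b u =>
      have hlast : (a :: b :: u).getLast? = (b :: u).getLast? := by
        simp [List.getLast?_cons_cons]
      obtain ⟨z, hz⟩ : ∃ z, (b :: u).getLast? = some z :=
        ⟨(b :: u).getLast (by simp), List.getLast?_eq_some_getLast (by simp)⟩
      have hkept : keptOf (a :: b :: u)
          = (if a = b then [] else [a]) ++ keptOf (b :: u) := by
        simp only [keptOf, List.drop_succ_cons, List.drop_zero, List.zip_cons_cons,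
          List.filter_cons]
        by_cases hab : a = b
        · subst hab; simp
        · simp [hab, bne_iff_ne]
      rw [hz] at ih
      rw [hlast, hz, hkept]
      by_cases hab : a = b
      · subst hab
        simp only [dedupAdj, if_true]
        simpa using ih
      · simp only [dedupAdj, if_neg hab]
        simp [ih]

-- A's fold: membership
theorem foldA_mem (xs : List String) (acc : List String) (x : String) :
    x ∈ xs.foldl unionStepA acc ↔ x ∈ acc ∨ x ∈ xs := by
  induction xs generalizing acc with
  | nil => simp
  | cons p t ih =>
    simp only [List.foldl_cons, ih, unionStepA]
    split_ifs with h
    · constructor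
      · rintro (h1 | h2)
        · exact Or.inl h1
        · exact Or.inr (List.mem_cons_of_mem _ h2)
      · rintro (h1 | h2)
        · exact Or.inl h1
        · rcases List.mem_cons.mp h2 with rfl | h3
          · exact Or.inl h
          · exact Or.inr h3
    · simp only [List.mem_append, List.mem_cons]
      tauto

-- A's fold: no duplicates
theorem foldA_nodup (xs : List String) (acc : List String) (h : acc.Nodup) :
    (xs.foldl unionStepA acc).Nodup := by
  induction xs generalizing acc with
  | nil => simpa using h
  | cons p t ih =>
    simp only [List.foldl_cons, unionStepA]
    split_ifs with hp
    · exact ih acc h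
    · refine ih _ ((List.nodup_append).mpr ⟨h, List.nodup_singleton _, ?_⟩)
      intro a ha b hb hab
      simp only [List.mem_singleton] at hb
      exact hp (hb ▸ hab ▸ ha)

-- B's dedup keeps exactly the members
theorem dedupAdj_mem (xs : List String) (x : String) :
    x ∈ dedupAdj xs ↔ x ∈ xs := by
  induction xs with
  | nil => simp [dedupAdj]
  | cons a t ih =>
    cases t with
    | nil => simp [dedupAdj]
    | cons b u =>
      simp only [dedupAdj]
      split_ifs with hab
      · subst hab
        rw [ih]
        simp only [List.mem_cons]
        tauto
      · simp only [List.mem_cons, ih, List.mem_cons]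

-- B's dedup on a ≤-sorted list is strictly increasing
theorem dedupAdj_pairwise (xs : List String) (h : xs.Pairwise (· ≤ ·)) :
    (dedupAdj xs).Pairwise (· < ·) := by
  induction xs with
  | nil => simp [dedupAdj]
  | cons a t ih =>
    cases t with
    | nil => simp [dedupAdj]
    | cons b u =>
      have hab : a ≤ b := (List.pairwise_cons.mp h).1 b (by simp)
      have hbu : (b :: u).Pairwise (· ≤ ·) := (List.pairwise_cons.mp h).2
      simp only [dedupAdj]
      split_ifs with hEq
      · exact ih hbu
      · refine List.pairwise_cons.mpr ⟨?_, ih hbu⟩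
        intro z hz
        have hzm : z ∈ b :: u := (dedupAdj_mem _ _).mp hz
        have hlt : a < b := lt_of_le_of_ne hab hEq
        rcases List.mem_cons.mp hzm with rfl | hzu
        · exact hlt
        · exact hlt.trans_le ((List.pairwise_cons.mp hbu).1 z hzu)

-- the key identity: sorted(A's unique list) = B's deduped sorted list
theorem sorted_foldA_eq_dedupAdj (tp : List String) :
    PySem.List.sorted (tp.foldl unionStepA []) (fun x => x) false
      = dedupAdj (PySem.List.sorted tp (fun x => x) false) := by
  have hsp : (PySem.List.sorted tp (fun x => x) false).Pairwise (· ≤ ·) := by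
    simpa using PySem.List.sorted_pairwise tp (fun x => x)
  have hDpw : (dedupAdj (PySem.List.sorted tp (fun x => x) false)).Pairwise (· < ·) :=
    dedupAdj_pairwise _ hsp
  have hUnd : (tp.foldl unionStepA []).Nodup := foldA_nodup tp [] (by simp)
  have hDnd : (dedupAdj (PySem.List.sorted tp (fun x => x) false)).Nodup :=
    hDpw.imp (fun h => ne_of_lt h)
  refine PySem.List.sorted_eq_of_perm_of_pairwise_lt _ _ _ ?_ hDpw
  refine (List.perm_ext_iff_of_nodup hDnd hUnd).mpr ?_
  intro a
  rw [dedupAdj_mem, foldA_mem]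
  simp [PySem.List.mem_sorted]

-- the three branches agree once A's unique list U is related to S = sorted U
theorem union_branches_eq (U : List String) :
    (if U = [] then "Any"
     else if U.length = 1 then PySem.List.pyGetD U 0 ""
     else PySem.Str.join " | " (PySem.List.sorted U (fun x => x) false))
  = (match PySem.List.sorted U (fun x => x) false with
     | [] => "Any"
     | [only] => only
     | unique => PySem.Str.join " | " unique) := by
  by_cases hnil : U = []
  · subst hnil
    rw [(PySem.List.sorted_eq_nil_iff ([] : List String) (fun x => x) false).mpr rfl]
    simp
  · by_cases hone : U.length = 1
    · obtain ⟨a, rfl⟩ := List.length_eq_one_iff.mp hone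
      rw [PySem.List.sorted_eq_self_of_pairwise [a] (fun x => x) (by simp)]
      simp [PySem.List.pyGetD]
    · have hlen : (PySem.List.sorted U (fun x => x) false).length = U.length :=
        PySem.List.length_sorted U (fun x => x) false
      rw [if_neg hnil, if_neg hone]
      have h2 : 2 ≤ U.length := by
        have h0 : 0 < U.length := List.length_pos_iff.mpr hnil
        omega
      rcases hS : PySem.List.sorted U (fun x => x) false with _ | ⟨a, _ | ⟨b, v⟩⟩
      · rw [hS] at hlen; simp at hlen; omega
      · rw [hS] at hlen
        simp only [List.length_cons, List.length_nil] at hlen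
        omega
      · rfl

-- ===== VERDICT (by name: the statement is the Claim_ definition above) =====
theorem union_type_py_spec : Claim_equal_union_type_py := by
  intro tp _
  show union_type_py tp = union_type_py_alt tp
  simp only [union_type_py, union_type_py_alt]
  rw [keptOf_last_eq_dedupAdj]
  rw [← sorted_foldA_eq_dedupAdj tp]
  exact union_branches_eq (tp.foldl unionStepA [])
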